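-- pv_equiv track=rewrite | github.com/funnydog/AoC2015 | es20/es20.py | find_house
-- ===== SOURCE A (Python) =====
-- def find_house(n):
--     length = n // 10
--     table = [0 for x in range(length+1)]
--     for i in range(1, length+1):
--         for j in range(i, length+1, i):
--             table[j] += i * 10
--
--     for i,v in enumerate(table):
--         if v >= n:
--             return i
--
--     return -1
-- ===== SOURCE B (Python) =====
-- def find_house(n):
--     for i in range(n // 10 + 1):
--         s = 0
--         d = 1
--         while d * d <= i:
--             if i % d == 0:
--                 s += d
--                 if d * d != i:
--                     s += i // d
--             d += 1
--         if s * 10 >= n: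
--             return i
--     return -1
-- ===== Notes on version B (the rewrite author's own statement) =====
-- stated objective: alternative
-- what changed: Replaces the O(n/10)-sized sieve table accumulated across all multiples with independent per-house divisor sums computed by trial division up to the square root, returning at the first qualifying house with no table at all.
import Mathlib
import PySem

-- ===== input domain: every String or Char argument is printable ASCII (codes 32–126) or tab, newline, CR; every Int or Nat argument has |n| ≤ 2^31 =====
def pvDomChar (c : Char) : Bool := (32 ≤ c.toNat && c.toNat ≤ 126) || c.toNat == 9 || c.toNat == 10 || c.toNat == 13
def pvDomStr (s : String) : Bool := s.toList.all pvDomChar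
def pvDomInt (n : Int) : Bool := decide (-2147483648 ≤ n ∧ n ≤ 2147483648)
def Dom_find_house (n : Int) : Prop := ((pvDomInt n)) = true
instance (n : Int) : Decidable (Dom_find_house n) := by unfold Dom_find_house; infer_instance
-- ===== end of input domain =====

-- B replaces A's sieve table (accumulating i*10 over all multiples of every i) with
-- independent per-house divisor sums by trial division up to the square root; no table is kept.

-- ===== PORT A =====
-- 'for i,v in enumerate(table): if v >= n: return i' / 'return -1'
def pvScanA (n : Int) : List (Int × Int) → Int
  | [] => -1
  | (i, v) :: rest => if v ≥ n then i else pvScanA n rest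

def find_house (n : Int) : Int :=
  let length := PySem.Int.floordiv n 10
  -- table = [0 for x in range(length+1)]
  let table : List Int := (PySem.List.pyRange 0 (length + 1) 1).map (fun _ => (0 : Int))
  -- for i in range(1, length+1): for j in range(i, length+1, i): table[j] += i * 10
  let table := (PySem.List.pyRange 1 (length + 1) 1).foldl
    (fun t i => (PySem.List.pyRange i (length + 1) i).foldl
      (fun t j => PySem.List.pySetD t j (PySem.List.pyGetD t j 0 + i * 10)) t) table
  pvScanA n (PySem.List.enumerate table 0)

-- ===== PORT B =====
-- the inner 'while d*d <= i' loop of Source B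
def pvDivSum (i d s : Int) : Int :=
  if h : d * d ≤ i then
    pvDivSum i (d + 1)
      (if PySem.Int.mod i d = 0 then
        s + d + (if d * d ≠ i then PySem.Int.floordiv i d else 0)
      else s)
  else s
termination_by (i + 1 - d).toNat
decreasing_by
  have hdi : d ≤ i := by nlinarith [sq_nonneg d, sq_nonneg (d - 1)]
  omega

-- 'for i in range(n // 10 + 1): … if s * 10 >= n: return i' / 'return -1'
def pvScanB (n : Int) : List Int → Int
  | [] => -1
  | i :: rest => if pvDivSum i 1 0 * 10 ≥ n then i else pvScanB n rest

def find_house_alt (n : Int) : Int :=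
  pvScanB n (PySem.List.pyRange 0 (PySem.Int.floordiv n 10 + 1) 1)

-- ===== PRECONDITION & SPEC =====
def Spec_find_house (n : Int) (out : Int) : Prop := out = find_house_alt n
instance (n : Int) (out : Int) : Decidable (Spec_find_house n out) := by unfold Spec_find_house; infer_instance

-- ===== CLAIM (what is proved, stated in full; the proofs are below) =====
def Claim_equal_find_house : Prop := ∀ (n : Int), Dom_find_house n → Spec_find_house n (find_house n)

-- ===== LEMMAS AND PROOFS =====

-- sum of all divisors
def pvSigma (m : Nat) : Nat := ∑ d ∈ m.divisors, d

-- contribution of trial divisor a to the divisor sum of m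
def pvG (m a : Nat) : Nat := if m % a = 0 then a + (if a * a ≠ m then m / a else 0) else 0

-- the while loop of B sums pvG over d .. sqrt i
theorem pvDivSum_eq (i : Int) (hi : 0 ≤ i) : ∀ d s : Int, 1 ≤ d →
    pvDivSum i d s = s + ∑ a ∈ Finset.Ico d.toNat (Nat.sqrt i.toNat + 1), (pvG i.toNat a : Int) := by
  intro d s
  induction d, s using pvDivSum.induct i with
  | case1 d s h ih =>
    intro hd
    simp only [dite_eq_ite] at ih
    have hd1 : 1 ≤ d + 1 := by omega
    rw [pvDivSum, dif_pos h, ih hd1]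
    have hdn : d = ((d.toNat : Nat) : Int) := by omega
    have hin : i = ((i.toNat : Nat) : Int) := by omega
    have hdd : d.toNat * d.toNat ≤ i.toNat := by
      have h1 : (d.toNat : Int) * (d.toNat : Int) ≤ (i.toNat : Int) := by rw [← hdn, ← hin]; exact h
      exact_mod_cast h1
    have hsq : d.toNat ≤ Nat.sqrt i.toNat := Nat.le_sqrt.mpr hdd
    have hlt : d.toNat < Nat.sqrt i.toNat + 1 := by omega
    rw [Finset.sum_eq_sum_Ico_succ_bot hlt]
    have htn : (d + 1).toNat = d.toNat + 1 := by omega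
    rw [htn]
    have hmod : PySem.Int.mod i d = ((i.toNat % d.toNat : Nat) : Int) := by
      rw [hin, hdn]; exact PySem.Int.mod_natCast _ _
    have hdiv : PySem.Int.floordiv i d = ((i.toNat / d.toNat : Nat) : Int) := by
      rw [hin, hdn]; exact PySem.Int.floordiv_natCast _ _
    have hne : (d * d ≠ i) ↔ (d.toNat * d.toNat ≠ i.toNat) := by
      constructor
      · intro hh hc; apply hh; rw [hdn, hin]; exact_mod_cast hc
      · intro hh hc; apply hh; rw [hdn, hin] at hc; exact_mod_cast hc
    unfold pvG
    by_cases hm : i.toNat % d.toNat = 0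
    · have hmz : PySem.Int.mod i d = 0 := by rw [hmod, hm]; rfl
      rw [if_pos hm]
      by_cases hq : d.toNat * d.toNat ≠ i.toNat
      · rw [if_pos hq, if_pos hmz, if_pos (hne.mpr hq), hdiv]
        push_cast
        rw [← hdn]
        ring
      · rw [if_neg hq, if_pos hmz, if_neg (fun hh => hq (hne.mp hh))]
        push_cast
        rw [← hdn]
        ring
    · rw [if_neg hm]
      have hmz : ¬ PySem.Int.mod i d = 0 := by
        rw [hmod]
        intro hh
        exact hm (by exact_mod_cast hh)
      rw [if_neg hmz]
      push_cast
      ring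
  | case2 d s h =>
    intro hd
    rw [pvDivSum, dif_neg h]
    have hbig : Nat.sqrt i.toNat + 1 ≤ d.toNat := by
      by_contra hc
      rw [not_le] at hc
      have h2 : d.toNat ≤ Nat.sqrt i.toNat := by omega
      have h3 := Nat.le_sqrt.mp h2
      apply h
      have hdn : d = ((d.toNat : Nat) : Int) := by omega
      have hin : i = ((i.toNat : Nat) : Int) := by omega
      rw [hdn, hin]
      exact_mod_cast h3
    rw [Finset.Ico_eq_empty (by omega)]
    simp

-- square-root pairing: the pvG terms over 1 .. sqrt m add up to the full divisor sum
theorem pvG_sum_nat (m : Nat) : ∑ a ∈ Finset.Ico 1 (Nat.sqrt m + 1), pvG m a = pvSigma m := by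
  rcases Nat.eq_zero_or_pos m with hm | hm
  · subst hm
    simp [pvSigma]
  have hm0 : m ≠ 0 := by omega
  -- restrict to divisors with a*a ≤ m
  have h1 : ∑ a ∈ Finset.Ico 1 (Nat.sqrt m + 1), pvG m a
      = ∑ a ∈ (Finset.Ico 1 (Nat.sqrt m + 1)).filter (fun a => a ∣ m),
          (a + (if a * a ≠ m then m / a else 0)) := by
    rw [Finset.sum_filter]
    refine Finset.sum_congr rfl ?_
    intro a ha
    rw [Finset.mem_Ico] at ha
    unfold pvG
    have : m % a = 0 ↔ a ∣ m := Iff.symm Nat.dvd_iff_mod_eq_zero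
    by_cases hdvd : a ∣ m
    · rw [if_pos hdvd, if_pos (this.mpr hdvd)]
    · rw [if_neg hdvd, if_neg (fun hc => hdvd (this.mp hc))]
  have hset : (Finset.Ico 1 (Nat.sqrt m + 1)).filter (fun a => a ∣ m)
      = m.divisors.filter (fun a => a * a ≤ m) := by
    ext a
    simp only [Finset.mem_filter, Finset.mem_Ico, Nat.mem_divisors]
    constructor
    · rintro ⟨⟨h1a, h2a⟩, h3a⟩
      exact ⟨⟨h3a, hm0⟩, Nat.le_sqrt.mp (by omega)⟩
    · rintro ⟨⟨h1a, _⟩, h2a⟩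
      have ha1 : 1 ≤ a := Nat.pos_of_dvd_of_pos h1a hm
      have := Nat.le_sqrt.mpr h2a
      exact ⟨⟨ha1, by omega⟩, h1a⟩
  have h2 : ∑ a ∈ m.divisors.filter (fun a => a * a ≤ m), (a + (if a * a ≠ m then m / a else 0))
      = (∑ a ∈ m.divisors.filter (fun a => a * a ≤ m), a)
        + ∑ a ∈ m.divisors.filter (fun a => a * a < m), m / a := by
    rw [Finset.sum_add_distrib]
    congr 1
    rw [← Finset.sum_filter, Finset.filter_filter]
    refine Finset.sum_congr ?_ (fun _ _ => rfl)
    ext a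
    simp only [Finset.mem_filter, Nat.mem_divisors]
    constructor
    · rintro ⟨h1a, h2a, h3a⟩; exact ⟨h1a, by omega⟩
    · rintro ⟨h1a, h2a⟩; exact ⟨h1a, by omega, by omega⟩
  have hbij : ∑ a ∈ m.divisors.filter (fun a => a * a < m), m / a
      = ∑ b ∈ m.divisors.filter (fun b => ¬ b * b ≤ m), b := by
    refine Finset.sum_nbij' (fun a => m / a) (fun b => m / b) ?_ ?_ ?_ ?_ ?_
    · intro a ha
      simp only [Finset.mem_filter, Nat.mem_divisors] at ha ⊢
      obtain ⟨⟨hd, _⟩, hlt⟩ := ha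
      have ha1 : 0 < a := Nat.pos_of_dvd_of_pos hd hm
      have hq : m / a * a = m := Nat.div_mul_cancel hd
      refine ⟨⟨Nat.div_dvd_of_dvd hd, hm0⟩, ?_⟩
      have halt : a < m / a := by nlinarith
      nlinarith
    · intro b hb
      simp only [Finset.mem_filter, Nat.mem_divisors] at hb ⊢
      obtain ⟨⟨hd, _⟩, hgt⟩ := hb
      have hb1 : 0 < b := Nat.pos_of_dvd_of_pos hd hm
      have hq : m / b * b = m := Nat.div_mul_cancel hd
      refine ⟨⟨Nat.div_dvd_of_dvd hd, hm0⟩, ?_⟩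
      have hblt : m / b < b := by nlinarith
      nlinarith
    · intro a ha
      simp only [Finset.mem_filter, Nat.mem_divisors] at ha
      exact Nat.div_div_self ha.1.1 hm0
    · intro b hb
      simp only [Finset.mem_filter, Nat.mem_divisors] at hb
      exact Nat.div_div_self hb.1.1 hm0
    · intro a _
      rfl
  rw [h1, hset, h2, hbij, pvSigma, ← Finset.sum_filter_add_sum_filter_not m.divisors (fun a => a * a ≤ m)]

-- the two first-hit scans agree when the per-index values agree
theorem pvScan_eq (n : Int) (js : List Int) (g : Int → Int)
    (h : ∀ j ∈ js, pvDivSum j 1 0 * 10 = g j) :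
    pvScanA n (js.map (fun j => (j, g j))) = pvScanB n js := by
  induction js with
  | nil => rfl
  | cons j rest ih =>
    simp only [List.map_cons, pvScanA, pvScanB]
    rw [h j (by simp)]
    split
    · rfl
    · exact ih (fun x hx => h x (by simp [hx]))

-- inner sieve loop: adds c at every index of js (all indices in range)
theorem pvInner_fold (js : List Int) (t : List Int) (c k : Int)
    (hjs : ∀ j ∈ js, 0 ≤ j ∧ j < (t.length : Int)) (hk : 0 ≤ k) :
    (js.foldl (fun t j => PySem.List.pySetD t j (PySem.List.pyGetD t j 0 + c)) t).length = t.length ∧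
    PySem.List.pyGetD (js.foldl (fun t j => PySem.List.pySetD t j (PySem.List.pyGetD t j 0 + c)) t) k 0
      = PySem.List.pyGetD t k 0 + c * (js.count k : Int) := by
  induction js generalizing t with
  | nil => simp
  | cons j rest ih =>
    obtain ⟨hj0, hjlt⟩ := hjs j (by simp)
    set t' := PySem.List.pySetD t j (PySem.List.pyGetD t j 0 + c) with ht'
    have hlen' : t'.length = t.length := PySem.List.length_pySetD t j _
    have hrest : ∀ x ∈ rest, 0 ≤ x ∧ x < (t'.length : Int) := by
      intro x hx; rw [hlen']; exact hjs x (by simp [hx])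
    obtain ⟨l1, l2⟩ := ih t' hrest
    refine ⟨by simpa [hlen'] using l1, ?_⟩
    simp only [List.foldl_cons, ← ht']
    rw [l2]
    -- pyGetD t' k 0 = if k = j then pyGetD t j 0 + c else pyGetD t k 0
    have hj' : j = ((j.toNat : Nat) : Int) := by omega
    have hk' : k = ((k.toNat : Nat) : Int) := by omega
    have hjn : j.toNat < t.length := by omega
    have hget : PySem.List.pyGetD t' k 0 =
        if k.toNat = j.toNat then PySem.List.pyGetD t j 0 + c else PySem.List.pyGetD t k 0 := by
      rw [ht', hj', hk', PySem.List.pyGetD_pySetD_natCast t j.toNat k.toNat _ 0 hjn]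
      simp [← hj', ← hk']
    rw [hget]
    have hcnt : ((j :: rest).count k : Int) = (rest.count k : Int) + (if k.toNat = j.toNat then 1 else 0) := by
      by_cases hkj : k = j
      · simp [hkj]
      · have h2 : ¬ k.toNat = j.toNat := by omega
        have h3 : ¬ j = k := fun hh => hkj hh.symm
        simp [h3, h2]
    rw [hcnt]
    split
    · have hkj : k = j := by omega
      rw [hkj]; ring
    · ring

-- count of index k in range(i, L+1, i)
theorem pvCount_pyRange (L i k : Int) (hi : 1 ≤ i) :
    ((PySem.List.pyRange i (L + 1) i).count k : Int)
      = if i ∣ k ∧ i ≤ k ∧ k ≤ L then 1 else 0 := by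
  have hpos : (0:Int) < i := by omega
  have hnd : (PySem.List.pyRange i (L + 1) i).Nodup := by
    rw [PySem.List.pyRange_of_pos _ _ hpos]
    refine List.Nodup.map ?_ List.nodup_range
    intro a b hab
    simp only at hab
    have h2 : (a : Int) = b := by
      have h3 : i * (a:Int) = i * b := by omega
      exact mul_left_cancel₀ (by omega) h3
    exact_mod_cast h2
  have hmem := @PySem.List.mem_pyRange_iff_of_pos i (L + 1) i hpos k
  by_cases hin : k ∈ PySem.List.pyRange i (L + 1) i
  · rw [List.count_eq_one_of_mem hnd hin]
    rw [hmem] at hin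
    obtain ⟨h1, h2, c, hc⟩ := hin
    rw [if_pos ⟨⟨c + 1, by rw [mul_add, mul_one]; omega⟩, h1, by omega⟩]
    rfl
  · rw [List.count_eq_zero.mpr hin]
    rw [hmem] at hin
    rw [if_neg]
    · rfl
    · rintro ⟨⟨c, hc⟩, h1, h2⟩
      exact hin ⟨h1, by omega, c - 1, by rw [mul_sub, mul_one]; omega⟩

-- total sieve contribution at index k is 10 * (divisor sum of k)
theorem pvSumContrib (L k : Int) (hk : 0 ≤ k) (hkL : k ≤ L) :
    ((PySem.List.pyRange 1 (L + 1) 1).map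
        (fun i => i * 10 * ((PySem.List.pyRange i (L + 1) i).count k : Int))).sum
      = 10 * (pvSigma k.toNat : Int) := by
  have hmap : (PySem.List.pyRange 1 (L + 1) 1).map
        (fun i => i * 10 * ((PySem.List.pyRange i (L + 1) i).count k : Int))
      = (PySem.List.pyRange 1 (L + 1) 1).map
        (fun i => if i ∣ k ∧ i ≤ k ∧ k ≤ L then i * 10 else 0) := by
    refine List.map_congr_left ?_
    intro i hi
    rw [PySem.List.mem_pyRange_one] at hi
    rw [pvCount_pyRange L i k hi.1]
    split <;> ring
  rw [hmap, PySem.List.pyRange_one]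
  rw [List.map_map]
  have hL0 : 0 ≤ L := by omega
  -- list sum over range = Finset sum
  have hbridge : ∀ (n : Nat) (f : Nat → Int), ((List.range n).map f).sum = ∑ t ∈ Finset.range n, f t :=
    fun n f => rfl
  rw [hbridge]
  have hstep : ∀ t ∈ Finset.range (L + 1 - 1).toNat,
      ((fun i => if i ∣ k ∧ i ≤ k ∧ k ≤ L then i * 10 else 0) ∘ fun t : Nat => (1:Int) + t) t
        = (fun a : Nat => if a ∣ k.toNat ∧ a ≤ k.toNat then ((a : Int) * 10) else 0) (1 + t) := by
    intro t _
    simp only [Function.comp]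
    have hcast : ((1 + t : Nat) : Int) = 1 + (t : Int) := by push_cast; ring
    rw [← hcast]
    have hdvd : ((1 + t : Nat) : Int) ∣ k ↔ (1 + t) ∣ k.toNat := by
      rw [show k = ((k.toNat : Nat) : Int) by omega]
      exact_mod_cast Int.natCast_dvd_natCast
    have hle : ((1 + t : Nat) : Int) ≤ k ↔ (1 + t) ≤ k.toNat := by omega
    by_cases hc : (1 + t) ∣ k.toNat ∧ (1 + t) ≤ k.toNat
    · rw [if_pos ⟨hdvd.mpr hc.1, hle.mpr hc.2, hkL⟩, if_pos hc]
    · rw [if_neg, if_neg hc]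
      rintro ⟨a1, a2, a3⟩
      exact hc ⟨hdvd.mp a1, hle.mp a2⟩
  rw [Finset.sum_congr rfl hstep]
  have hre : ∑ t ∈ Finset.range (L + 1 - 1).toNat,
      (fun a : Nat => if a ∣ k.toNat ∧ a ≤ k.toNat then ((a : Int) * 10) else 0) (1 + t)
      = ∑ a ∈ Finset.Ico 1 (L.toNat + 1),
        (if a ∣ k.toNat ∧ a ≤ k.toNat then ((a : Int) * 10) else 0) := by
    rw [Finset.sum_Ico_eq_sum_range]
    have hn : L.toNat + 1 - 1 = (L + 1 - 1).toNat := by omega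
    rw [hn]
  rw [hre, ← Finset.sum_filter]
  have hset : (Finset.Ico 1 (L.toNat + 1)).filter (fun a => a ∣ k.toNat ∧ a ≤ k.toNat)
      = (k.toNat).divisors := by
    ext a
    simp only [Finset.mem_filter, Finset.mem_Ico, Nat.mem_divisors]
    constructor
    · rintro ⟨⟨ha1, _⟩, hd, hak⟩
      exact ⟨hd, by omega⟩
    · rintro ⟨hd, hne⟩
      have ha1 : 0 < a := Nat.pos_of_dvd_of_pos hd (by omega)
      have hak : a ≤ k.toNat := Nat.le_of_dvd (by omega) hd
      have : k.toNat ≤ L.toNat := by omega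
      exact ⟨⟨ha1, by omega⟩, hd, hak⟩
  rw [hset, pvSigma]
  push_cast
  rw [Finset.mul_sum]
  refine Finset.sum_congr rfl ?_
  intro a _
  ring

-- outer sieve loop: accumulates every i's contribution
theorem pvOuter_fold (L : Int) (is : List Int) (t : List Int)
    (his : ∀ i ∈ is, 1 ≤ i) (k : Int) (hk : 0 ≤ k) (hlen : (t.length : Int) = L + 1) :
    ((is.foldl (fun t i => (PySem.List.pyRange i (L + 1) i).foldl
        (fun t j => PySem.List.pySetD t j (PySem.List.pyGetD t j 0 + i * 10)) t) t).length = t.length) ∧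
    PySem.List.pyGetD (is.foldl (fun t i => (PySem.List.pyRange i (L + 1) i).foldl
        (fun t j => PySem.List.pySetD t j (PySem.List.pyGetD t j 0 + i * 10)) t) t) k 0
      = PySem.List.pyGetD t k 0
        + (is.map (fun i => i * 10 * ((PySem.List.pyRange i (L + 1) i).count k : Int))).sum := by
  induction is generalizing t with
  | nil => simp
  | cons i rest ih =>
    have hi1 : 1 ≤ i := his i (by simp)
    have hrange : ∀ j ∈ PySem.List.pyRange i (L + 1) i, 0 ≤ j ∧ j < (t.length : Int) := by
      intro j hj
      rw [PySem.List.mem_pyRange_iff_of_pos (by omega) j] at hj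
      exact ⟨by omega, by omega⟩
    obtain ⟨l1, l2⟩ := pvInner_fold (PySem.List.pyRange i (L + 1) i) t (i * 10) k hrange hk
    set t' := (PySem.List.pyRange i (L + 1) i).foldl
        (fun t j => PySem.List.pySetD t j (PySem.List.pyGetD t j 0 + i * 10)) t with ht'
    have hlen' : (t'.length : Int) = L + 1 := by rw [l1]; exact hlen
    obtain ⟨m1, m2⟩ := ih t' (fun x hx => his x (by simp [hx])) hlen'
    constructor
    · simp only [List.foldl_cons, ← ht']
      rw [m1, l1]
    · simp only [List.foldl_cons, ← ht', List.map_cons, List.sum_cons]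
      rw [m2, l2]
      ring

-- ===== VERDICT (by name: the statement is the Claim_ definition above) =====
theorem find_house_spec : Claim_equal_find_house := by
  intro n _
  unfold Spec_find_house find_house find_house_alt
  simp only []
  set L := PySem.Int.floordiv n 10 with hLdef
  by_cases hL0 : 0 ≤ L
  · -- main case
    set t0 : List Int := (PySem.List.pyRange 0 (L + 1) 1).map (fun _ => (0 : Int)) with ht0
    have hlen0 : (t0.length : Int) = L + 1 := by
      rw [ht0, List.length_map, PySem.List.length_pyRange_one]
      omega
    have his : ∀ i ∈ PySem.List.pyRange 1 (L + 1) 1, 1 ≤ i := by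
      intro i hi
      rw [PySem.List.mem_pyRange_one] at hi
      omega
    set T := (PySem.List.pyRange 1 (L + 1) 1).foldl
        (fun t i => (PySem.List.pyRange i (L + 1) i).foldl
          (fun t j => PySem.List.pySetD t j (PySem.List.pyGetD t j 0 + i * 10)) t) t0 with hT
    have hlenT : (T.length : Int) = L + 1 := by
      rw [hT, (pvOuter_fold L _ t0 his 0 le_rfl hlen0).1]
      exact hlen0
    have hget : ∀ k : Int, 0 ≤ k → k ≤ L →
        PySem.List.pyGetD T k 0 = 10 * (pvSigma k.toNat : Int) := by
      intro k hk hkL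
      have h0 : PySem.List.pyGetD t0 k 0 = 0 := by
        rw [ht0]
        exact PySem.List.pyGetD_map (fun _ => (0 : Int)) _ k 0
      rw [hT, (pvOuter_fold L _ t0 his k hk hlen0).2, h0,
          pvSumContrib L k hk hkL]
      ring
    have henum : PySem.List.enumerate T 0
        = (PySem.List.pyRange 0 (L + 1) 1).map (fun j => (j, PySem.List.pyGetD T j 0)) := by
      rw [PySem.List.enumerate_eq_map_pyRange T 0]
      congr 1
      rw [PySem.List.len_eq, hlenT]
    rw [henum]
    refine pvScan_eq n _ _ ?_
    intro j hj
    rw [PySem.List.mem_pyRange_one] at hj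
    have hj0 : 0 ≤ j := hj.1
    have hjL : j ≤ L := by omega
    rw [hget j hj0 hjL, pvDivSum_eq j hj0 1 0 le_rfl]
    have h1 : (1 : Int).toNat = 1 := rfl
    rw [h1]
    have := pvG_sum_nat j.toNat
    have hcast : ∑ a ∈ Finset.Ico 1 (Nat.sqrt j.toNat + 1), (pvG j.toNat a : Int)
        = (pvSigma j.toNat : Int) := by
      rw [← this]
      push_cast
      rfl
    rw [hcast]
    ring
  · -- n // 10 < 0: both loops are over the empty range
    have h1 : L + 1 ≤ 0 := by omega
    rw [PySem.List.pyRange_one_eq_nil (by omega : (L + 1 : Int) ≤ 0),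
        PySem.List.pyRange_one_eq_nil (by omega : (L + 1 : Int) ≤ 1)]
    simp [pvScanA, pvScanB]
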